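-- pv_equiv track=rewrite | github.com/paiml/depyler | examples/hard_while_patterns.py | convergent_sum
-- ===== SOURCE A (Python) =====
-- def convergent_sum(limit: int) -> int:
--     """Sum 1/2^i * scale for i=0..limit (scaled by 1000)."""
--     total: int = 0
--     term: int = 1000
--     i: int = 0
--     while i < limit and term > 0:
--         total = total + term
--         term = term // 2
--         i = i + 1
--     return total
-- ===== SOURCE B (Python) =====
-- def convergent_sum(limit: int) -> int:
--     """Sum 1/2^i * scale for i=0..limit (scaled by 1000)."""
--     # Closed form: sum_{i<k} (1000 >> i) = 2*(1000 - (1000 >> k)) - popcount(1000 mod 2^k),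
--     # with k = clamp(limit, 0, 10); 10 halvings take 1000 to 0, so larger limits add nothing.
--     k = min(max(limit, 0), 10)
--     return 2 * (1000 - (1000 >> k)) - bin(1000 & ((1 << k) - 1)).count("1")
-- ===== Notes on version B (the rewrite author's own statement) =====
-- stated objective: alternative
-- what changed: B replaces A's accumulate-and-halve while loop by a loop-free closed form: clamp the limit to the length of the halving series and evaluate the bit-arithmetic identity sum of the first k halvings of n = 2*(n - (n>>k)) - popcount(n mod 2^k).
import Mathlib
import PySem

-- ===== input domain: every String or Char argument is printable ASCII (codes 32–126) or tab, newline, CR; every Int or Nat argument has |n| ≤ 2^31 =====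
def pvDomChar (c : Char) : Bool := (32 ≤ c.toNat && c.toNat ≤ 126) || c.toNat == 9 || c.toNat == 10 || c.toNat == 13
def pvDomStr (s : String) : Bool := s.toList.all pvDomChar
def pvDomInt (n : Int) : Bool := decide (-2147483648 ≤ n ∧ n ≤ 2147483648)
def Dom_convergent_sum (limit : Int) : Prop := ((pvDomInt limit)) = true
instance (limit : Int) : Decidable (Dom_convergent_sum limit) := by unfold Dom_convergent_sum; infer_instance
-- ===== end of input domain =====

-- ===== PORT A =====
-- B replaces A's accumulate-and-halve while loop by a loop-free bit-arithmetic
-- closed form (objective: alternative decomposition, no speed claim).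
-- A's loop runs at most limit.toNat iterations (i goes 0,1,… and stops at i = limit),
-- so limit.toNat is structural fuel; the real loop condition is kept inside.
def csLoop (fuel : Nat) (limit total term i : Int) : Int :=
  match fuel with
  | 0 => total
  | fuel + 1 =>
    if i < limit ∧ term > 0 then
      csLoop fuel limit (total + term) (PySem.Int.floordiv term 2) (i + 1)
    else total

def convergent_sum (limit : Int) : Int := csLoop limit.toNat limit 0 1000 0

-- ===== PORT B =====
def convergent_sum_alt (limit : Int) : Int :=
  let k := min (max limit 0) 10
  -- k is clamped to [0,10], so Python's shifts by k are shifts by k.toNat;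
  -- bin(x).count("1") for x ≥ 0 is PySem.Int.bitCount x
  2 * (1000 - ((1000 : Int) >>> k.toNat)) -
    (PySem.Int.bitCount (PySem.Int.band 1000 (((1 : Int) <<< k.toNat) - 1)) : Int)

-- ===== PRECONDITION & SPEC =====
def Spec_convergent_sum (limit : Int) (out : Int) : Prop := out = convergent_sum_alt limit
instance (limit : Int) (out : Int) : Decidable (Spec_convergent_sum limit out) := by unfold Spec_convergent_sum; infer_instance

-- ===== CLAIM (what is proved, stated in full; the proofs are below) =====
def Claim_equal_convergent_sum : Prop := ∀ (limit : Int), Dom_convergent_sum limit → Spec_convergent_sum limit (convergent_sum limit)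

-- ===== LEMMAS AND PROOFS =====
-- fuel-free halving table from v, used only in the proofs
def termsOf (v : Int) : List Int :=
  if _h : v > 0 then v :: termsOf (PySem.Int.floordiv v 2) else []
termination_by v.toNat
decreasing_by
  have := PySem.Int.floordiv_eq_ediv_of_pos (a := v) (b := 2) (by omega)
  omega

-- fueled copy of termsOf, whose value on literals the kernel computes
def termsFuel (fuel : Nat) (v : Int) : List Int :=
  match fuel with
  | 0 => []
  | fuel + 1 =>
    if v > 0 then v :: termsFuel fuel (PySem.Int.floordiv v 2) else []

theorem termsFuel_eq_termsOf (fuel : Nat) (v : Int) (hf : v.toNat < fuel) :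
    termsFuel fuel v = termsOf v := by
  induction fuel generalizing v with
  | zero => omega
  | succ n ih =>
    rw [termsFuel, termsOf]
    split_ifs with hv
    · have := PySem.Int.floordiv_eq_ediv_of_pos (a := v) (b := 2) (by omega)
      rw [ih _ (by omega)]
    · rfl

theorem termsOf_1000 : termsOf 1000 = [1000, 500, 250, 125, 62, 31, 15, 7, 3, 1] := by
  rw [← termsFuel_eq_termsOf 1001 1000 (by norm_num)]
  decide

-- A's loop sums exactly the first (limit - i) entries of the halving table from term.
theorem csLoop_eq_take (fuel : Nat) (v limit i total : Int) (hi : i ≤ limit)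
    (hf : (limit - i).toNat ≤ fuel) :
    csLoop fuel limit total v i =
      total + ((termsOf v).take (limit - i).toNat).sum := by
  induction fuel generalizing v i total with
  | zero =>
    have h0 : (limit - i).toNat = 0 := by omega
    rw [csLoop, h0, List.take_zero, List.sum_nil, add_zero]
  | succ n ih =>
    rw [csLoop, termsOf]
    by_cases hv : v > 0
    · by_cases hil : i < limit
      · rw [if_pos ⟨hil, hv⟩, dif_pos hv]
        have h1 : (limit - i).toNat = ((limit - (i + 1)).toNat) + 1 := by omega
        rw [h1, List.take_succ_cons, List.sum_cons,
          ih (PySem.Int.floordiv v 2) (i + 1) (total + v) (by omega) (by omega)]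
        ring
      · rw [if_neg (by tauto), dif_pos hv]
        have h0 : (limit - i).toNat = 0 := by omega
        rw [h0, List.take_zero, List.sum_nil, add_zero]
    · rw [if_neg (by tauto), dif_neg hv, List.take_nil, List.sum_nil, add_zero]

-- ===== VERDICT (by name: the statement is the Claim_ definition above) =====
theorem convergent_sum_spec : Claim_equal_convergent_sum := by
  intro limit _
  unfold Spec_convergent_sum
  rcases Int.lt_or_le limit 0 with h | h
  · have hA : convergent_sum limit = 0 := by
      unfold convergent_sum
      have h0 : limit.toNat = 0 := by omega
      rw [h0]; rfl
    have hk : min (max limit 0) 10 = 0 := by omega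
    unfold convergent_sum_alt
    rw [hA, hk]
    decide
  · rcases Int.lt_or_le limit 10 with h10 | h10
    · interval_cases limit <;> decide
    · have hA : convergent_sum limit = 1994 := by
        unfold convergent_sum
        rw [csLoop_eq_take limit.toNat 1000 limit 0 0 h (by omega), termsOf_1000,
          List.take_of_length_le (by simp; omega)]
        decide
      have hk : min (max limit 0) 10 = 10 := by omega
      unfold convergent_sum_alt
      rw [hA, hk]
      decide
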